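-- pv_equiv track=rewrite | github.com/Wilfred-Mason/uMAMA | src/camera.py | sortCircles
-- ===== SOURCE A (Python) =====
-- def sortCircles(circles):
--     sortedCircles = []
--     row1 = []
--     row2 = []
--     row3 = []
--     row4 = []
--     for circle in circles:
--         if (circle[0][1] < 50):
--             row1.append(circle)
--         elif (circle[0][1] > 50) and (circle[0][1] < 100):
--             row2.append(circle)
--         elif (circle[0][1] > 100) and (circle[0][1] < 170):
--             row3.append(circle)
--         elif (circle[0][1] > 170):
--             row4.append(circle)
--     row1 = sorted(row1, key = lambda x: x[0])
--     row2 = sorted(row2, key = lambda x: x[0])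
--     row3 = sorted(row3, key = lambda x: x[0])
--     row4 = sorted(row4, key = lambda x: x[0])
--     sortedCircles = row1 + row2 + row3 + row4
--     return sortedCircles
-- ===== SOURCE B (Python) =====
-- def sortCircles(circles):
--     def rowIdx(c):
--         y = c[0][1]
--         if y < 50:
--             return 1
--         if 50 < y < 100:
--             return 2
--         if 100 < y < 170:
--             return 3
--         if y > 170:
--             return 4
--         return None
--     tagged = [(rowIdx(c), c) for c in circles if rowIdx(c) is not None]
--     tagged.sort(key=lambda t: (t[0], t[1][0]))
--     return [c for _, c in tagged]
-- ===== Notes on version B (the rewrite author's own statement) =====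
-- stated objective: simpler
-- what changed: Replaces A's four explicit row buckets, four separate sorts and concatenation with one pass that tags each surviving circle with its row index and a single stable sort by the composite key (row, circle[0]).
import Mathlib
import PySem

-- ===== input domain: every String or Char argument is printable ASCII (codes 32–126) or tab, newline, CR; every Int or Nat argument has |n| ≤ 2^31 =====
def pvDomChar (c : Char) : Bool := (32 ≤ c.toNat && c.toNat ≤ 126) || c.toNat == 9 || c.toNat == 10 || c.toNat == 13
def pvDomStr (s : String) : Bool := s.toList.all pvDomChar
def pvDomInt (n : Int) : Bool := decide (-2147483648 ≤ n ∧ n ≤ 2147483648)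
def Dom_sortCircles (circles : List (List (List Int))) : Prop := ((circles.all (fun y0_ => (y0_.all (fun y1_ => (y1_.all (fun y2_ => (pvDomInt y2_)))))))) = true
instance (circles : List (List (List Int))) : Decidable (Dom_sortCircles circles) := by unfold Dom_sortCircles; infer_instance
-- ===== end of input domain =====

-- ===== PORT A =====
-- B changes the decomposition: one tag-and-stable-sort instead of A's four buckets, four sorts and a concatenation.
-- A-side helpers
def pvYA (c : List (List Int)) : Int := PySem.List.pyGetD (PySem.List.pyGetD c 0 []) 1 0
def pvKeyA (c : List (List Int)) : List Int := PySem.List.pyGetD c 0 []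

def sortCircles (circles : List (List (List Int))) : List (List (List Int)) :=
  let rows := circles.foldl
    (fun (st : List (List (List Int)) × List (List (List Int)) × List (List (List Int)) × List (List (List Int))) circle =>
      if pvYA circle < 50 then (st.1 ++ [circle], st.2.1, st.2.2.1, st.2.2.2)
      else if 50 < pvYA circle ∧ pvYA circle < 100 then (st.1, st.2.1 ++ [circle], st.2.2.1, st.2.2.2)
      else if 100 < pvYA circle ∧ pvYA circle < 170 then (st.1, st.2.1, st.2.2.1 ++ [circle], st.2.2.2)
      else if 170 < pvYA circle then (st.1, st.2.1, st.2.2.1, st.2.2.2 ++ [circle])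
      else st)
    ([], [], [], [])
  PySem.List.sorted rows.1 pvKeyA ++ PySem.List.sorted rows.2.1 pvKeyA
    ++ PySem.List.sorted rows.2.2.1 pvKeyA ++ PySem.List.sorted rows.2.2.2 pvKeyA

-- ===== PORT B =====
-- B-side helpers
def pvRowIdx (c : List (List Int)) : Option Int :=
  if pvYA c < 50 then some 1
  else if 50 < pvYA c ∧ pvYA c < 100 then some 2
  else if 100 < pvYA c ∧ pvYA c < 170 then some 3
  else if 170 < pvYA c then some 4
  else none

def sortCircles_alt (circles : List (List (List Int))) : List (List (List Int)) :=
  let tagged := circles.filterMap (fun c => (pvRowIdx c).map (fun r => (r, c)))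
  (PySem.List.sorted2 tagged Prod.fst (fun t => PySem.List.pyGetD t.2 0 []) false).map Prod.snd

-- ===== PRECONDITION & SPEC =====
-- Pre_ excludes exactly the inputs where Python A raises IndexError: a circle that is the
-- empty list, or whose first element has fewer than two coordinates (circle[0][1] fails).
def Pre_sortCircles (circles : List (List (List Int))) : Prop :=
  ∀ c ∈ circles, c ≠ [] ∧ 2 ≤ (c.getD 0 []).length
instance (circles : List (List (List Int))) : Decidable (Pre_sortCircles circles) := by
  unfold Pre_sortCircles; infer_instance

def pvWitness_sortCircles : List (List (List Int)) :=
  [[[10, 60]], [[3, 20], [7]], [[5, 200]], [[1, 120]]]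

def Spec_sortCircles (circles : List (List (List Int))) (out : List (List (List Int))) : Prop := out = sortCircles_alt circles
instance (circles : List (List (List Int))) (out : List (List (List Int))) : Decidable (Spec_sortCircles circles out) := by unfold Spec_sortCircles; infer_instance

-- ===== CLAIM (what is proved, stated in full; the proofs are below) =====
def Claim_equal_sortCircles : Prop := ∀ (circles : List (List (List Int))), Dom_sortCircles circles → Pre_sortCircles circles → Spec_sortCircles circles (sortCircles circles)

-- ===== LEMMAS AND PROOFS =====

-- generic insertion-sort loop (the shape shared by PySem.List.sorted / sorted2)
def pvSort {a : Type} (bf : a → a → Bool) (l : List a) : List a :=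
  l.foldl (fun acc x => PySem.List.insertBy bf x acc) []

theorem pvSort_append {a : Type} (bf : a → a → Bool) (l : List a) (x : a) :
    pvSort bf (l ++ [x]) = PySem.List.insertBy bf x (pvSort bf l) := by
  simp [pvSort]

theorem mem_pvSort {a : Type} (bf : a → a → Bool) (l : List a) (y : a) :
    y ∈ pvSort bf l ↔ y ∈ l := by
  induction l using List.reverseRecOn with
  | nil => simp [pvSort]
  | append_singleton l x ih =>
      rw [pvSort_append]
      simp [PySem.List.mem_insertBy, ih]
      tauto

theorem insertBy_append_left {a : Type} (bf : a → a → Bool) (x : a) (A B : List a)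
    (h : ∀ c ∈ A, bf x c = false) :
    PySem.List.insertBy bf x (A ++ B) = A ++ PySem.List.insertBy bf x B := by
  induction A with
  | nil => simp
  | cons c A ih =>
      have hc := h c (by simp)
      simp [PySem.List.insertBy, hc]
      exact ih (fun d hd => h d (by simp [hd]))

theorem insertBy_append_right {a : Type} (bf : a → a → Bool) (x : a) (A B : List a)
    (h : ∀ c ∈ B, bf x c = true) :
    PySem.List.insertBy bf x (A ++ B) = PySem.List.insertBy bf x A ++ B := by
  induction A with
  | nil =>
      cases B with
      | nil => simp [PySem.List.insertBy]
      | cons c B => simp [PySem.List.insertBy, h c (by simp)]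
  | cons c A ih =>
      by_cases hc : bf x c = true
      · simp [PySem.List.insertBy, hc]
      · simp only [List.cons_append, PySem.List.insertBy, hc]
        simp [ih]

theorem insertBy_congr {a : Type} (bf bf' : a → a → Bool) (x : a) (l : List a)
    (h : ∀ c ∈ l, bf x c = bf' x c) :
    PySem.List.insertBy bf x l = PySem.List.insertBy bf' x l := by
  induction l with
  | nil => rfl
  | cons c l ih =>
      have hc := h c (by simp)
      simp only [PySem.List.insertBy, hc]
      rw [ih (fun d hd => h d (by simp [hd]))]

theorem pvSort_congr {a : Type} (bf bf' : a → a → Bool) (l : List a)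
    (h : ∀ c ∈ l, ∀ d ∈ l, bf c d = bf' c d) :
    pvSort bf l = pvSort bf' l := by
  induction l using List.reverseRecOn with
  | nil => rfl
  | append_singleton l x ih =>
      rw [pvSort_append, pvSort_append]
      rw [ih (fun c hc d hd => h c (by simp [hc]) d (by simp [hd]))]
      exact insertBy_congr _ _ _ _ (fun c hc =>
        h x (by simp) c (by simp [(mem_pvSort bf' l c).mp hc]))

theorem insertBy_map {a b : Type} (bf : b → b → Bool) (f : a → b) (x : a) (l : List a) :
    PySem.List.insertBy bf (f x) (l.map f) = (PySem.List.insertBy (fun c d => bf (f c) (f d)) x l).map f := by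
  induction l with
  | nil => rfl
  | cons c l ih =>
      by_cases hc : bf (f x) (f c) = true
      · simp [PySem.List.insertBy, hc]
      · simp only [List.map_cons, PySem.List.insertBy, hc]
        simp at hc
        simp [ih]

theorem pvSort_map {a b : Type} (bf : b → b → Bool) (f : a → b) (l : List a) :
    pvSort bf (l.map f) = (pvSort (fun c d => bf (f c) (f d)) l).map f := by
  induction l using List.reverseRecOn with
  | nil => rfl
  | append_singleton l x ih =>
      rw [List.map_append, List.map_singleton, pvSort_append, pvSort_append, ih, insertBy_map]

theorem pvSort_sep {a : Type} (bf : a → a → Bool) (p : a → Bool) (l : List a)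
    (h : ∀ c ∈ l, ∀ d ∈ l, p c = true → p d = false → bf c d = true ∧ bf d c = false) :
    pvSort bf l = pvSort bf (l.filter p) ++ pvSort bf (l.filter (fun x => !p x)) := by
  induction l using List.reverseRecOn with
  | nil => rfl
  | append_singleton l x ih =>
      have h' : ∀ c ∈ l, ∀ d ∈ l, p c = true → p d = false → bf c d = true ∧ bf d c = false :=
        fun c hc d hd => h c (by simp [hc]) d (by simp [hd])
      rw [pvSort_append, ih h']
      by_cases hx : p x = true
      · rw [insertBy_append_right bf x _ _ (fun d hd => by
          have hd' := (mem_pvSort _ _ d).mp hd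
          simp only [List.mem_filter] at hd'
          exact (h x (by simp) d (by simp [hd'.1]) hx (by simpa using hd'.2)).1)]
        rw [← pvSort_append]
        have : (l ++ [x]).filter p = l.filter p ++ [x] := by simp [hx]
        have h2 : (l ++ [x]).filter (fun y => !p y) = l.filter (fun y => !p y) := by simp [hx]
        rw [this, h2]
      · simp at hx
        rw [insertBy_append_left bf x _ _ (fun d hd => by
          have hd' := (mem_pvSort _ _ d).mp hd
          simp only [List.mem_filter] at hd'
          exact (h d (by simp [hd'.1]) x (by simp) hd'.2 hx).2)]
        rw [← pvSort_append]
        have : (l ++ [x]).filter p = l.filter p := by simp [hx]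
        have h2 : (l ++ [x]).filter (fun y => !p y) = l.filter (fun y => !p y) ++ [x] := by simp [hx]
        rw [this, h2]

-- row index is always between 1 and 4
theorem pvRowIdx_range (c : List (List Int)) (r : Int) (h : pvRowIdx c = some r) :
    1 ≤ r ∧ r ≤ 4 := by
  unfold pvRowIdx at h
  split_ifs at h <;> simp_all <;> omega

-- the tagged list, filtered to one row, is the map of the plain filtered list
theorem tagged_filter (cs : List (List (List Int))) (r : Int) :
    (cs.filterMap (fun c => (pvRowIdx c).map (fun s => (s, c)))).filter
        (fun t => decide (t.1 = r))
      = (cs.filter (fun c => decide (pvRowIdx c = some r))).map (fun c => (r, c)) := by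
  induction cs with
  | nil => rfl
  | cons c cs ih =>
      cases hr : pvRowIdx c with
      | none => simpa [hr] using ih
      | some s =>
          by_cases hs : s = r
          · subst hs; simp [hr, ih]
          · simp [hr, hs, ih]

-- A's bucket loop computes the four row filters
theorem bucket_loop (cs : List (List (List Int)))
    (s1 s2 s3 s4 : List (List (List Int))) :
    cs.foldl
      (fun (st : List (List (List Int)) × List (List (List Int)) × List (List (List Int)) × List (List (List Int))) circle =>
        if pvYA circle < 50 then (st.1 ++ [circle], st.2.1, st.2.2.1, st.2.2.2)
        else if 50 < pvYA circle ∧ pvYA circle < 100 then (st.1, st.2.1 ++ [circle], st.2.2.1, st.2.2.2)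
        else if 100 < pvYA circle ∧ pvYA circle < 170 then (st.1, st.2.1, st.2.2.1 ++ [circle], st.2.2.2)
        else if 170 < pvYA circle then (st.1, st.2.1, st.2.2.1, st.2.2.2 ++ [circle])
        else st)
      (s1, s2, s3, s4)
      = (s1 ++ cs.filter (fun c => decide (pvRowIdx c = some 1)),
         s2 ++ cs.filter (fun c => decide (pvRowIdx c = some 2)),
         s3 ++ cs.filter (fun c => decide (pvRowIdx c = some 3)),
         s4 ++ cs.filter (fun c => decide (pvRowIdx c = some 4))) := by
  induction cs generalizing s1 s2 s3 s4 with
  | nil => simp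
  | cons c cs ih =>
      simp only [List.foldl_cons]
      split_ifs with h1 h2 h3 h4
      · rw [ih]
        have e : pvRowIdx c = some 1 := by simp [pvRowIdx, h1]
        simp [e]
      · rw [ih]
        have e : pvRowIdx c = some 2 := by simp [pvRowIdx, h1, h2.1, h2.2]
        simp [e]
      · rw [ih]
        have e : pvRowIdx c = some 3 := by simp [pvRowIdx, h1, h2, h3.1, h3.2]
        simp [e]
      · rw [ih]
        have e : pvRowIdx c = some 4 := by simp [pvRowIdx, h1, h2, h3, h4]
        simp [e]
      · rw [ih]
        have e : pvRowIdx c = none := by simp [pvRowIdx, h1, h2, h3, h4]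
        simp [e]

-- proof-side abbreviations for the two comparison functions
def pvBfA : List (List Int) → List (List Int) → Bool :=
  fun c d => decide (pvKeyA c < pvKeyA d)

def pvBf2 : (Int × List (List Int)) → (Int × List (List Int)) → Bool :=
  fun t u => decide (t.1 < u.1)
    || (!decide (u.1 < t.1) && decide (PySem.List.pyGetD t.2 0 [] < PySem.List.pyGetD u.2 0 []))

theorem sorted_eq_pvSortA (xs : List (List (List Int))) :
    PySem.List.sorted xs pvKeyA = pvSort pvBfA xs := rfl

theorem sorted2_eq_pvSort2 (xs : List (Int × List (List Int))) :
    PySem.List.sorted2 xs Prod.fst (fun t => PySem.List.pyGetD t.2 0 []) false = pvSort pvBf2 xs := rfl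

theorem pvBf2_sep (a b : Int × List (List Int)) (r : Int) (ha : a.1 = r) (hb : r < b.1) :
    pvBf2 a b = true ∧ pvBf2 b a = false := by
  have h1 : ¬ (b.1 < r) := by omega
  simp [pvBf2, ha, hb, h1]

theorem mem_tagged (cs : List (List (List Int))) (t : Int × List (List Int))
    (h : t ∈ cs.filterMap (fun c => (pvRowIdx c).map (fun r => (r, c)))) :
    pvRowIdx t.2 = some t.1 := by
  simp only [List.mem_filterMap, Option.map_eq_some_iff] at h
  obtain ⟨c, _, r, hr, rfl⟩ := h
  exact hr

theorem mem_tagged_range (cs : List (List (List Int))) (t : Int × List (List Int))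
    (h : t ∈ cs.filterMap (fun c => (pvRowIdx c).map (fun r => (r, c)))) :
    1 ≤ t.1 ∧ t.1 ≤ 4 :=
  pvRowIdx_range _ _ (mem_tagged cs t h)

-- one bucketed group of the composite sort equals A's per-row sort
theorem group_sort (cs : List (List (List Int))) (r : Int) :
    (pvSort pvBf2 ((cs.filter (fun c => decide (pvRowIdx c = some r))).map (fun c => (r, c)))).map Prod.snd
      = pvSort pvBfA (cs.filter (fun c => decide (pvRowIdx c = some r))) := by
  have hc : pvSort pvBf2 ((cs.filter (fun c => decide (pvRowIdx c = some r))).map (fun c => (r, c)))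
      = pvSort (fun t u => decide (PySem.List.pyGetD t.2 0 ([] : List Int) < PySem.List.pyGetD u.2 0 []))
          ((cs.filter (fun c => decide (pvRowIdx c = some r))).map (fun c => (r, c))) := by
    apply pvSort_congr
    intro a hamem b hbmem
    simp only [List.mem_map] at hamem hbmem
    obtain ⟨c, -, rfl⟩ := hamem
    obtain ⟨d, -, rfl⟩ := hbmem
    simp [pvBf2]
  rw [hc, pvSort_map]
  simp [List.map_map, Function.comp_def]
  rfl

-- ===== VERDICT (by name: the statement is the Claim_ definition above) =====
theorem sortCircles_spec : Claim_equal_sortCircles := by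
  intro circles _ _
  unfold Spec_sortCircles
  show sortCircles circles = sortCircles_alt circles
  unfold sortCircles sortCircles_alt
  rw [bucket_loop]
  simp only [List.nil_append]
  rw [sorted2_eq_pvSort2, sorted_eq_pvSortA, sorted_eq_pvSortA, sorted_eq_pvSortA, sorted_eq_pvSortA]
  -- name the tagged list
  set Tg := circles.filterMap (fun c => (pvRowIdx c).map (fun r => (r, c))) with hTg
  have hrange : ∀ t ∈ Tg, 1 ≤ t.1 ∧ t.1 ≤ 4 := fun t ht => mem_tagged_range circles t (hTg ▸ ht)
  -- split off row 1, then row 2, then row 3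
  have h1 : pvSort pvBf2 Tg
      = pvSort pvBf2 (Tg.filter (fun t => decide (t.1 = 1)))
        ++ pvSort pvBf2 (Tg.filter (fun t => !decide (t.1 = 1))) := by
    apply pvSort_sep
    intro a ha b hb hpa hpb
    simp only [decide_eq_true_eq] at hpa
    simp only [decide_eq_false_iff_not] at hpb
    exact pvBf2_sep a b 1 hpa (by have := hrange b hb; omega)
  have h2 : pvSort pvBf2 (Tg.filter (fun t => !decide (t.1 = 1)))
      = pvSort pvBf2 ((Tg.filter (fun t => !decide (t.1 = 1))).filter (fun t => decide (t.1 = 2)))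
        ++ pvSort pvBf2 ((Tg.filter (fun t => !decide (t.1 = 1))).filter (fun t => !decide (t.1 = 2))) := by
    apply pvSort_sep
    intro a ha b hb hpa hpb
    simp only [decide_eq_true_eq] at hpa
    simp only [decide_eq_false_iff_not] at hpb
    have hb' := hrange b (List.mem_of_mem_filter hb)
    have hbn : ¬ b.1 = 1 := by simpa using (List.mem_filter.mp hb).2
    exact pvBf2_sep a b 2 hpa (by omega)
  have h3 : pvSort pvBf2 ((Tg.filter (fun t => !decide (t.1 = 1))).filter (fun t => !decide (t.1 = 2)))
      = pvSort pvBf2 (((Tg.filter (fun t => !decide (t.1 = 1))).filter (fun t => !decide (t.1 = 2))).filter (fun t => decide (t.1 = 3)))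
        ++ pvSort pvBf2 (((Tg.filter (fun t => !decide (t.1 = 1))).filter (fun t => !decide (t.1 = 2))).filter (fun t => !decide (t.1 = 3))) := by
    apply pvSort_sep
    intro a ha b hb hpa hpb
    simp only [decide_eq_true_eq] at hpa
    simp only [decide_eq_false_iff_not] at hpb
    have hb1 := List.mem_of_mem_filter (List.mem_of_mem_filter hb)
    have hb' := hrange b hb1
    have hbn2 : ¬ b.1 = 2 := by simpa using (List.mem_filter.mp hb).2
    have hbn1 : ¬ b.1 = 1 := by
      simpa using (List.mem_filter.mp (List.mem_of_mem_filter hb)).2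
    exact pvBf2_sep a b 3 hpa (by omega)
  -- collapse the nested filters into single row filters
  have f2 : (Tg.filter (fun t => !decide (t.1 = 1))).filter (fun t => decide (t.1 = 2))
      = Tg.filter (fun t => decide (t.1 = 2)) := by
    rw [List.filter_filter]
    apply List.filter_congr
    intro t _
    by_cases h : t.1 = 2 <;> simp [h]
  have f3 : ((Tg.filter (fun t => !decide (t.1 = 1))).filter (fun t => !decide (t.1 = 2))).filter (fun t => decide (t.1 = 3))
      = Tg.filter (fun t => decide (t.1 = 3)) := by
    rw [List.filter_filter, List.filter_filter]
    apply List.filter_congr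
    intro t _
    by_cases h : t.1 = 3 <;> simp [h]
  have f4 : ((Tg.filter (fun t => !decide (t.1 = 1))).filter (fun t => !decide (t.1 = 2))).filter (fun t => !decide (t.1 = 3))
      = Tg.filter (fun t => decide (t.1 = 4)) := by
    rw [List.filter_filter, List.filter_filter]
    apply List.filter_congr
    intro t ht
    have := hrange t ht
    by_cases h : t.1 = 4
    · simp [h]
    · simp [h]; omega
  rw [h1, h2, h3, f2, f3, f4]
  rw [tagged_filter, tagged_filter, tagged_filter, tagged_filter]
  simp only [List.map_append]
  rw [group_sort, group_sort, group_sort, group_sort]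
  simp [List.append_assoc]
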